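-- pv_equiv track=rewrite | github.com/ojnoonan/nba_stats | Application/backend/app/core/security.py | sanitize_query_param
-- ===== SOURCE A (Python) =====
-- def sanitize_query_param(value: str, max_length: int = 100) -> str:
--     """Sanitize query parameter input."""
--
--     if not value:
--         return ""
--
--     # Basic sanitization
--     sanitized = value.strip()[:max_length]
--
--     # Remove potentially dangerous characters
--     dangerous_chars = ["<", ">", "&", '"', "'", "%", ";"]
--     for char in dangerous_chars:
--         sanitized = sanitized.replace(char, "")
--
--     return sanitized
-- ===== SOURCE B (Python) =====
-- DANGEROUS = {"<", ">", "&", '"', "'", "%", ";"}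
--
--
-- def sanitize_query_param(value: str, max_length: int = 100) -> str:
--     """Sanitize query parameter input (single-pass filter)."""
--     if not value:
--         return ""
--     sanitized = value.strip()[:max_length]
--     return "".join(c for c in sanitized if c not in DANGEROUS)
-- ===== Notes on version B (the rewrite author's own statement) =====
-- stated objective: idiomatic
-- what changed: Replaces the seven sequential str.replace passes with a single membership-filtered pass over the characters using a constant set of dangerous characters.
import Mathlib
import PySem

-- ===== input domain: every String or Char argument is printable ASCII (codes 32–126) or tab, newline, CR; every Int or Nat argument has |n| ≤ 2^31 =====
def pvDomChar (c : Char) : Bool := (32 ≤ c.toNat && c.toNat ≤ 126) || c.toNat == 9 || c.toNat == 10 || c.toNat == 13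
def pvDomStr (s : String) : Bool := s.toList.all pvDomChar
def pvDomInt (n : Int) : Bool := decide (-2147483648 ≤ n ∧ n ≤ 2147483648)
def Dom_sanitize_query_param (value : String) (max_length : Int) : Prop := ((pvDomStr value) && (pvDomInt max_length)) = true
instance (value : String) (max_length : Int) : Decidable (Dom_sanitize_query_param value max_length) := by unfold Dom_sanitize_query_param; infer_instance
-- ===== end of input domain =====

-- B replaces A's seven sequential str.replace passes with one membership-filtered
-- pass over the characters (idiomatic; same return value on every input).

-- ===== PORT A =====
def sanitize_query_param (value : String) (max_length : Int) : String :=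
  if value = "" then ""
  else
    let sanitized := PySem.Str.slice (PySem.Str.strip value) none (some max_length)
    let dangerous_chars : List Char := ['<', '>', '&', '"', '\'', '%', ';']
    dangerous_chars.foldl (fun s c => PySem.Str.replace s (String.ofList [c]) "") sanitized

-- ===== PORT B =====
def pvDangerousSet : List Char := ['<', '>', '&', '"', '\'', '%', ';']

def sanitize_query_param_alt (value : String) (max_length : Int) : String :=
  if value = "" then ""
  else
    let sanitized := PySem.Str.slice (PySem.Str.strip value) none (some max_length)
    String.ofList (sanitized.toList.filter (fun c => !(pvDangerousSet.contains c)))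

-- ===== PRECONDITION & SPEC =====
def Spec_sanitize_query_param (value : String) (max_length : Int) (out : String) : Prop := out = sanitize_query_param_alt value max_length
instance (value : String) (max_length : Int) (out : String) : Decidable (Spec_sanitize_query_param value max_length out) := by unfold Spec_sanitize_query_param; infer_instance

-- ===== CLAIM (what is proved, stated in full; the proofs are below) =====
def Claim_equal_sanitize_query_param : Prop := ∀ (value : String) (max_length : Int), Dom_sanitize_query_param value max_length → Spec_sanitize_query_param value max_length (sanitize_query_param value max_length)

-- ===== LEMMAS AND PROOFS =====

-- replace.go with a single-char pattern and empty replacement is a filter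
theorem pv_replace_go_filter (c : Char) : ∀ (fuel : Nat) (l acc : List Char),
    l.length ≤ fuel →
    PySem.Chars.replace.go [c] [] fuel l acc = acc.reverse ++ l.filter (· ≠ c) := by
  intro fuel
  induction fuel with
  | zero =>
    intro l acc h
    have : l = [] := List.eq_nil_of_length_eq_zero (Nat.le_zero.mp h)
    subst this
    simp [PySem.Chars.replace.go]
  | succ n ih =>
    intro l acc h
    cases l with
    | nil => simp [PySem.Chars.replace.go]
    | cons x t =>
      by_cases hx : x = c
      · subst hx
        have : ([x].isPrefixOf (x :: t)) = true := by simp [List.isPrefixOf]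
        simp only [PySem.Chars.replace.go, this, if_true]
        rw [ih]
        · simp
        · simpa using Nat.le_of_succ_le_succ h
      · have : ([c].isPrefixOf (x :: t)) = false := by
          simp [List.isPrefixOf]
          exact fun h' => hx h'.symm
        simp only [PySem.Chars.replace.go, this]
        rw [ih t (x :: acc) (by simpa using Nat.le_of_succ_le_succ h)]
        simp [hx]

theorem pv_replace_single_filter (s : List Char) (c : Char) :
    PySem.Chars.replace s [c] [] = s.filter (· ≠ c) := by
  have h : ([c] : List Char).isEmpty = false := by simp
  simp only [PySem.Chars.replace, h, Bool.false_eq_true, if_false]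
  simpa using pv_replace_go_filter c s.length s [] (Nat.le_refl _)

theorem pv_beq_decide (c d : Char) : (c == d) = decide (c = d) := by
  cases h : c == d <;> simp_all

theorem pv_str_replace_single (s : String) (c : Char) :
    PySem.Str.replace s (String.ofList [c]) "" =
      String.ofList (s.toList.filter (fun x => !decide (x = c))) := by
  have h := pv_replace_single_filter s.toList c
  simp only [ne_eq, decide_not] at h
  simp [PySem.Str.replace, h]

-- ===== VERDICT (by name: the statement is the Claim_ definition above) =====
theorem sanitize_query_param_spec : Claim_equal_sanitize_query_param := by
  intro value max_length _
  unfold Spec_sanitize_query_param sanitize_query_param sanitize_query_param_alt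
  by_cases hv : value = ""
  · simp [hv]
  · simp only [hv, if_false]
    simp only [List.foldl, pv_str_replace_single, String.toList_ofList, List.filter_filter]
    congr 1
    apply List.filter_congr
    intro c _
    simp only [pvDangerousSet, List.contains_cons, List.contains_nil, Bool.or_false,
      Bool.not_or, pv_beq_decide]
    ac_rfl
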